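-- pv_equiv track=rewrite | github.com/Emre12335/infix-postfix-prefix | infix_to_postfix-prefix.py | replaces
-- ===== SOURCE A (Python) =====
-- def replaces(str1: str):
--     nstr = ""
--     for i in str1:
--         if i != "(" and i != ")":
--             nstr += i
--         elif i == "(":
--             nstr += ")"
--         else:
--             nstr += "("
--     return nstr
-- ===== SOURCE B (Python) =====
-- def replaces(str1: str):
--     # staged passes: park '(' on a sentinel, turn ')' into '(', then restore the sentinel as ')'
--     t = str1.replace('(', '\x00')
--     t = t.replace(')', '(')
--     return t.replace('\x00', ')')
-- ===== Notes on version B (the rewrite author's own statement) =====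
-- stated objective: alternative
-- what changed: Replaced the per-character loop with if/elif branches building the result by concatenation with three whole-string replace passes through a sentinel character (open paren to sentinel, close paren to open paren, sentinel to close paren); no explicit loop or conditional remains in B.
import Mathlib
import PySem

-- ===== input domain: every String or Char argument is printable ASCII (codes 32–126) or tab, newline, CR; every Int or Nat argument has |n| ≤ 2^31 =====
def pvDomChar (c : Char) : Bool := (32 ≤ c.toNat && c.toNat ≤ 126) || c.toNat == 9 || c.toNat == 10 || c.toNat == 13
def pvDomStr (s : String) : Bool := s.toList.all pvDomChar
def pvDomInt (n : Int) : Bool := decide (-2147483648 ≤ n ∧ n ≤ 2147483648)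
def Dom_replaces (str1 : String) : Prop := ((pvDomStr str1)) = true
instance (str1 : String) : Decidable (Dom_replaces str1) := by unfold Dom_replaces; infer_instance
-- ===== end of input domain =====

-- B replaces A's per-character loop with three whole-string replace passes through a sentinel
-- ('(' -> '\x00', ')' -> '(', '\x00' -> ')'); the sentinel lies outside the printable-ASCII domain.


-- ===== PORT A =====
-- for i in str1: build nstr by the if/elif chain, as a foldl over the characters
def replaces (str1 : String) : String :=
  String.ofList (str1.toList.foldl
    (fun nstr i =>
      if i ≠ '(' ∧ i ≠ ')' then nstr ++ [i]
      else if i = '(' then nstr ++ [')']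
      else nstr ++ ['(']) [])

-- ===== PORT B =====
-- t = str1.replace('(', '\x00'); t = t.replace(')', '('); return t.replace('\x00', ')')
def replaces_alt (str1 : String) : String :=
  let t1 := PySem.Str.replace str1 "(" "\x00"
  let t2 := PySem.Str.replace t1 ")" "("
  PySem.Str.replace t2 "\x00" ")"

-- ===== PRECONDITION & SPEC =====
def Spec_replaces (str1 : String) (out : String) : Prop := out = replaces_alt str1
instance (str1 : String) (out : String) : Decidable (Spec_replaces str1 out) := by unfold Spec_replaces; infer_instance

-- ===== CLAIM (what is proved, stated in full; the proofs are below) =====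
def Claim_equal_replaces : Prop := ∀ (str1 : String), Dom_replaces str1 → Spec_replaces str1 (replaces str1)

-- ===== LEMMAS AND PROOFS =====

-- Chars.replace with a one-character old/new pattern is the pointwise substitution
lemma replace_go_single (c d : Char) (l acc : List Char) (fuel : Nat) (h : l.length ≤ fuel) :
    PySem.Chars.replace.go [c] [d] fuel l acc
      = acc.reverse ++ l.map (fun x => if x = c then d else x) := by
  induction fuel generalizing l acc with
  | zero =>
    cases l with
    | nil => simp [PySem.Chars.replace.go]
    | cons a t => simp at h
  | succ n ih =>
    cases l with
    | nil => simp [PySem.Chars.replace.go]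
    | cons a t =>
      rw [PySem.Chars.replace.go]
      simp only [List.length_cons, Nat.add_le_add_iff_right] at h
      by_cases hc : a = c
      · subst hc
        simp [List.isPrefixOf, ih t _ h]
      · simp [List.isPrefixOf, hc, ih t _ h, Ne.symm hc]

lemma replace_single (c d : Char) (l : List Char) :
    PySem.Chars.replace l [c] [d] = l.map (fun x => if x = c then d else x) := by
  simp [PySem.Chars.replace, replace_go_single c d l [] l.length le_rfl]

-- A's loop produces the pointwise swap of '(' and ')'
lemma replaces_foldl (l acc : List Char) :
    l.foldl (fun nstr i =>
      if i ≠ '(' ∧ i ≠ ')' then nstr ++ [i]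
      else if i = '(' then nstr ++ [')']
      else nstr ++ ['(']) acc
    = acc ++ l.map (fun c => if c = '(' then ')' else if c = ')' then '(' else c) := by
  induction l generalizing acc with
  | nil => simp
  | cons c t ih =>
    simp only [List.foldl_cons, List.map_cons, ih]
    by_cases h1 : c = '('
    · subst h1; simp
    · by_cases h2 : c = ')'
      · subst h2; simp
      · simp [h1, h2]

-- ===== VERDICT (by name: the statement is the Claim_ definition above) =====
theorem replaces_spec : Claim_equal_replaces := by
  intro s hdom
  unfold Spec_replaces replaces replaces_alt
  rw [← String.toList_inj]
  show (String.ofList (s.toList.foldl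
      (fun nstr i =>
        if i ≠ '(' ∧ i ≠ ')' then nstr ++ [i]
        else if i = '(' then nstr ++ [')']
        else nstr ++ ['(']) [])).toList
    = (PySem.Str.replace (PySem.Str.replace (PySem.Str.replace s "(" "\x00") ")" "(") "\x00" ")").toList
  have hB : (PySem.Str.replace (PySem.Str.replace (PySem.Str.replace s "(" "\x00") ")" "(") "\x00" ")").toList
      = ((s.toList.map (fun x => if x = '(' then '\x00' else x)).map
            (fun x => if x = ')' then '(' else x)).map
            (fun x => if x = '\x00' then ')' else x) := by
    simp [PySem.Str.toList_replace, replace_single]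
  rw [String.toList_ofList, replaces_foldl, List.nil_append, hB, List.map_map, List.map_map]
  apply List.map_congr_left
  intro c hc
  have hd : pvDomChar c = true := by
    unfold Dom_replaces pvDomStr at hdom
    exact List.all_eq_true.mp hdom c hc
  have hne : c ≠ '\x00' := by
    intro h; subst h; simp [pvDomChar] at hd
  simp only [Function.comp]
  by_cases h1 : c = '('
  · subst h1; decide
  · by_cases h2 : c = ')'
    · subst h2; decide
    · simp [h1, h2, hne]
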